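-- pv_equiv track=rewrite | github.com/acmeism/RosettaCodeData | Task/ABC-problem/Python/abc-problem-2.py | _abc
-- ===== SOURCE A (Python) =====
-- def _abc(word, blocks):
--     for i, ch in enumerate(word):
--         for blk in (b for b in blocks if ch in b):
--             whatsleft = word[i + 1:]
--             blksleft = blocks[:]
--             blksleft.remove(blk)
--             if not whatsleft:
--                 return True, blksleft
--             if not blksleft:
--                 return False, blksleft
--             ans, blksleft = _abc(whatsleft, blksleft)
--             if ans:
--                 return ans, blksleft
--         else:
--             break
--     return False, blocks
-- ===== SOURCE B (Python) =====
-- def _abc(word, blocks):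
--     # Iterative DFS with an explicit stack of (suffix, remaining_blocks, next_candidate_index)
--     # frames, exploring candidate blocks in list order (same pre-order as the recursion).
--     if not word:
--         return False, blocks
--     stack = [(word, list(blocks), 0)]
--     while stack:
--         suffix, rem, idx = stack.pop()
--         ch = suffix[0]
--         j = idx
--         while j < len(rem) and ch not in rem[j]:
--             j += 1
--         if j == len(rem):
--             continue
--         blksleft = list(rem)
--         blksleft.remove(rem[j])
--         if len(suffix) == 1:
--             return True, blksleft
--         stack.append((suffix, rem, j + 1))
--         stack.append((suffix[1:], blksleft, 0))
--     return False, blocks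
-- ===== Notes on version B (the rewrite author's own statement) =====
-- stated objective: alternative
-- what changed: The recursive backtracking is replaced by an iterative depth-first search over an explicit stack of (suffix, remaining-blocks, next-candidate-index) frames that visits the same search tree in the same pre-order.
-- intended difference: When the word has at least 2 letters, there is exactly one block and it contains the word's first letter, A returns (False, []) because of its early 'if not blksleft' return, while B returns (False, blocks); returning the original block list on failure is the intended behaviour, as A itself does on every other failing input. — e.g. on _abc("ab", ["ab"]): A returns (false, []), B returns (false, ["ab"])
import Mathlib
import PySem

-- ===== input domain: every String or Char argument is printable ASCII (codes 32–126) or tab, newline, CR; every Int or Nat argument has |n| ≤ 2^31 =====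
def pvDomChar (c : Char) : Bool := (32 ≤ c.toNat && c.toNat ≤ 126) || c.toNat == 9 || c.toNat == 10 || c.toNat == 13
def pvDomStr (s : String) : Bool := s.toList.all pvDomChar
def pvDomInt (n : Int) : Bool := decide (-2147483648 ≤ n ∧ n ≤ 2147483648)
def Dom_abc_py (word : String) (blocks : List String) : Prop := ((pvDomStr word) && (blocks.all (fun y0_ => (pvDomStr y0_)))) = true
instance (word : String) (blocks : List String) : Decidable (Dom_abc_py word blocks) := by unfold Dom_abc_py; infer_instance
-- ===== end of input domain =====

-- B replaces the recursive backtracking by an explicit-stack DFS visiting the same tree in the same order (objective: alternative).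

-- ===== PORT A =====
-- blksleft = blocks[:]; blksleft.remove(blk)  — remove first occurrence; blk is drawn from blocks, so remove? succeeds (getD is a formality)
def pyRemove (xs : List String) (x : String) : List String :=
  (PySem.List.remove? xs x).getD xs

-- A's outer 'for i, ch in enumerate(word)' always breaks after its first iteration (the inner for's
-- 'else: break'), so the recursion consumes the first character; the inner generator is walked by abcInner.
mutual
def abcAux (w : List Char) (blocks : List String) : Bool × List String :=
  match w with
  | [] => (false, blocks)
  | ch :: rest =>
    match abcInner ch rest blocks blocks with
    | some r => r
    | none => (false, blocks)      -- 'else: break' then 'return False, blocks'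
termination_by (w.length, 1, 0)

def abcInner (ch : Char) (rest : List Char) (blocks : List String) (cands : List String) : Option (Bool × List String) :=
  match cands with
  | [] => none
  | blk :: cs =>
    if ch ∈ blk.toList then
      let blksleft := pyRemove blocks blk
      if rest.isEmpty then some (true, blksleft)
      else if blksleft.isEmpty then some (false, blksleft)
      else
        let r := abcAux rest blksleft
        if r.1 then some r else abcInner ch rest blocks cs
    else abcInner ch rest blocks cs
termination_by (rest.length + 1, 0, cands.length)
end

def abc_py (word : String) (blocks : List String) : Bool × List String :=
  abcAux word.toList blocks

-- ===== PORT B =====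
-- the inner "while j < len(rem) and ch not in rem[j]: j += 1" scan
def bScan (ch : Char) (rem : List String) (j : Nat) : Nat :=
  if h : j < rem.length then
    if ch ∈ (rem[j]).toList then j else bScan ch rem (j + 1)
  else j
termination_by rem.length - j

-- weight of one stack frame, used only to justify termination of the DFS loop
def bFrameW : List Char × List String × Nat → Nat
  | (s, rem, idx) => ((rem.length + 1 - idx) + 1) * (rem.length + 2) ^ s.length

def bStackW (stk : List (List Char × List String × Nat)) : Nat :=
  (stk.map bFrameW).sum

-- the "while stack:" loop, with a Nat fuel as a pure totality guard (fuel starts above the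
-- combinatorial weight bStackW of the initial stack, which strictly decreases at every iteration,
-- so the 0-fuel branch is never reached)
def bLoopF (blocks0 : List String) (fuel : Nat) (stack : List (List Char × List String × Nat)) : Bool × List String :=
  match fuel with
  | 0 => (false, blocks0)          -- unreachable totality guard
  | fuel + 1 =>
    match stack with
    | [] => (false, blocks0)
    | (suffix, rem, idx) :: stk =>
      match suffix with
      | [] => bLoopF blocks0 fuel stk    -- unreachable: every pushed frame carries a nonempty suffix
      | ch :: srest =>
        let j := bScan ch rem idx
        if hj : j < rem.length then
          let blksleft := pyRemove rem (rem[j])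
          if srest.isEmpty then (true, blksleft)
          else bLoopF blocks0 fuel ((srest, blksleft, 0) :: (ch :: srest, rem, j + 1) :: stk)
        else bLoopF blocks0 fuel stk

def abc_py_alt (word : String) (blocks : List String) : Bool × List String :=
  if word.toList.isEmpty then (false, blocks)
  else bLoopF blocks (bStackW [(word.toList, blocks, 0)] + 1) [(word.toList, blocks, 0)]

-- ===== PRECONDITION & SPEC =====
-- When the word has at least 2 letters, there is exactly one block and it contains the word's first
-- letter, A returns (False, []) via its early 'if not blksleft' return, while B returns (False, blocks);
-- returning the original block list on failure is the intended behaviour (A does so on all other failures).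
def D_abc_py (word : String) (blocks : List String) : Prop :=
  2 ≤ word.toList.length ∧ blocks.length = 1 ∧ (word.toList.headD ' ') ∈ (blocks.headD "").toList
instance (word : String) (blocks : List String) : Decidable (D_abc_py word blocks) := by
  unfold D_abc_py; infer_instance

def Spec_abc_py (word : String) (blocks : List String) (out : Bool × List String) : Prop :=
  ¬ D_abc_py word blocks → out = abc_py_alt word blocks
instance (word : String) (blocks : List String) (out : Bool × List String) : Decidable (Spec_abc_py word blocks out) := by
  unfold Spec_abc_py; infer_instance

def pvDiffWitness_abc_py : String × List String := ("ab", ["ab"])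
def pvDiffWitnessOut_abc_py : (Bool × List String) × (Bool × List String) :=
  ((false, []), (false, ["ab"]))

-- ===== CLAIM =====
def Claim_unchanged_abc_py : Prop := ∀ (word : String) (blocks : List String), Dom_abc_py word blocks → Spec_abc_py word blocks (abc_py word blocks)
def Claim_changed_abc_py : Prop := Dom_abc_py (pvDiffWitness_abc_py.1) (pvDiffWitness_abc_py.2) ∧ D_abc_py (pvDiffWitness_abc_py.1) (pvDiffWitness_abc_py.2) ∧ abc_py (pvDiffWitness_abc_py.1) (pvDiffWitness_abc_py.2) = pvDiffWitnessOut_abc_py.1 ∧ abc_py_alt (pvDiffWitness_abc_py.1) (pvDiffWitness_abc_py.2) = pvDiffWitnessOut_abc_py.2 ∧ pvDiffWitnessOut_abc_py.1 ≠ pvDiffWitnessOut_abc_py.2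
def Claim_exact_abc_py : Prop := ∀ (word : String) (blocks : List String), Dom_abc_py word blocks → D_abc_py word blocks → abc_py word blocks ≠ abc_py_alt word blocks

-- ===== LEMMAS AND PROOFS =====

theorem bScan_ge (ch : Char) (rem : List String) (j : Nat) : j ≤ bScan ch rem j := by
  unfold bScan
  split
  · split
    · exact le_refl _
    · exact Nat.le_trans (Nat.le_succ j) (bScan_ge ch rem (j+1))
  · exact le_refl _
termination_by rem.length - j

theorem pyRemove_length {rem : List String} {j : Nat} (hj : j < rem.length) :
    (pyRemove rem rem[j]).length + 1 = rem.length := by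
  have hmem : rem[j] ∈ rem := List.getElem_mem hj
  have h1 : PySem.List.remove? rem rem[j] = some (rem.erase rem[j]) :=
    PySem.List.remove?_eq_some_erase rem rem[j] hmem
  simp [pyRemove, h1, List.length_erase_of_mem hmem]
  omega

theorem bFrameW_pos (s : List Char) (rem : List String) (idx : Nat) :
    0 < bFrameW (s, rem, idx) := by
  simp only [bFrameW]
  positivity

theorem bStackW_lt_cons (f : List Char × List String × Nat)
    (stk : List (List Char × List String × Nat)) (h : 0 < bFrameW f) :
    bStackW stk < bStackW (f :: stk) := by
  simp only [bStackW, List.map_cons, List.sum_cons]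
  omega

theorem bLoop_dec_push (ch : Char) (srest : List Char) (rem : List String) (idx : Nat)
    (stk : List (List Char × List String × Nat)) (hj : bScan ch rem idx < rem.length) :
    bStackW ((srest, pyRemove rem (rem[bScan ch rem idx]), 0) ::
             (ch :: srest, rem, bScan ch rem idx + 1) :: stk)
      < bStackW ((ch :: srest, rem, idx) :: stk) := by
  simp only [bStackW, List.map_cons, List.sum_cons, bFrameW, List.length_cons]
  have hgj : idx ≤ bScan ch rem idx := bScan_ge ch rem idx
  have hbl : (pyRemove rem rem[bScan ch rem idx]).length + 1 = rem.length := pyRemove_length hj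
  have hpow : (rem.length + 1) ^ (srest.length + 1) < (rem.length + 2) ^ (srest.length + 1) :=
    Nat.pow_lt_pow_left (by omega) (Nat.succ_ne_zero _)
  have hfirst : ((pyRemove rem rem[bScan ch rem idx]).length + 1 - 0 + 1) *
      ((pyRemove rem rem[bScan ch rem idx]).length + 2) ^ srest.length
      = (rem.length + 1) ^ (srest.length + 1) := by
    rw [show (pyRemove rem rem[bScan ch rem idx]).length + 2 = rem.length + 1 by omega,
        show (pyRemove rem rem[bScan ch rem idx]).length + 1 - 0 + 1 = rem.length + 1 by omega,
        ← pow_succ']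
  rw [hfirst]
  have hm : (rem.length + 1 - (bScan ch rem idx + 1) + 1) * ((rem.length + 2) ^ (srest.length + 1))
        + (rem.length + 2) ^ (srest.length + 1)
      ≤ (rem.length + 1 - idx + 1) * ((rem.length + 2) ^ (srest.length + 1)) := by
    have hc : (rem.length + 1 - (bScan ch rem idx + 1) + 1) + 1 ≤ rem.length + 1 - idx + 1 := by omega
    calc (rem.length + 1 - (bScan ch rem idx + 1) + 1) * ((rem.length + 2) ^ (srest.length + 1))
            + (rem.length + 2) ^ (srest.length + 1)
        = ((rem.length + 1 - (bScan ch rem idx + 1) + 1) + 1) * ((rem.length + 2) ^ (srest.length + 1)) := by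
          ring
      _ ≤ _ := Nat.mul_le_mul_right _ hc
  linarith [hpow, hm]


theorem pyRemove_length_mem {xs : List String} {x : String} (h : x ∈ xs) :
    (pyRemove xs x).length + 1 = xs.length := by
  have h1 : PySem.List.remove? xs x = some (xs.erase x) :=
    PySem.List.remove?_eq_some_erase xs x h
  have h2 : 0 < xs.length := List.length_pos_of_mem h
  simp [pyRemove, h1, List.length_erase_of_mem h]
  omega

-- clean reference recursion (proof-side only): leftover blocks on success, none on failure
mutual
def cAux (w : List Char) (blocks : List String) : Option (List String) :=
  match w with
  | [] => none
  | ch :: rest => cInner ch rest blocks blocks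
termination_by (w.length, 1, 0)

def cInner (ch : Char) (rest : List Char) (blocks : List String) (cands : List String) : Option (List String) :=
  match cands with
  | [] => none
  | blk :: cs =>
    if ch ∈ blk.toList then
      let blksleft := pyRemove blocks blk
      if rest.isEmpty then some blksleft
      else
        match cAux rest blksleft with
        | some L => some L
        | none => cInner ch rest blocks cs
    else cInner ch rest blocks cs
termination_by (rest.length + 1, 0, cands.length)
end

-- the early-return '(False, [])' condition at one level of A
def badOne (w : List Char) (blocks : List String) : Bool :=
  match w, blocks with
  | ch :: _ :: _, [blk] => decide (ch ∈ blk.toList)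
  | _, _ => false

def auxOut (w : List Char) (b : List String) : Bool × List String :=
  match cAux w b with
  | some L => (true, L)
  | none => if badOne w b then (false, []) else (false, b)

theorem cAux_empty_blocks (w : List Char) : cAux w [] = none := by
  cases w with
  | nil => simp [cAux]
  | cons c r => simp [cAux, cInner]

theorem inner_char (ch : Char) (rest : List Char) (blocks : List String)
    (IH : ∀ b', abcAux rest b' = auxOut rest b') :
    ∀ cs pre, blocks = pre ++ cs →
    abcInner ch rest blocks cs =
      (match cInner ch rest blocks cs with
       | some L => some ((true : Bool), L)
       | none =>
         if blocks.length = 1 ∧ rest ≠ [] ∧ cs.any (fun b => decide (ch ∈ b.toList)) then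
           some ((false : Bool), ([] : List String))
         else none) := by
  intro cs
  induction cs with
  | nil =>
    intro pre hpre
    simp [abcInner, cInner]
  | cons blk cs ih =>
    intro pre hpre
    have hmem : blk ∈ blocks := by simp [hpre]
    have hlen : (pyRemove blocks blk).length + 1 = blocks.length := pyRemove_length_mem hmem
    by_cases hch : ch ∈ blk.toList
    · by_cases hrest : rest.isEmpty
      · rw [abcInner, cInner]
        simp [hch, hrest]
      · by_cases hbl : (pyRemove blocks blk).isEmpty
        · -- blocks = [blk]; A returns (false, []) here, the reference search fails
          have hblknil : pyRemove blocks blk = [] := List.isEmpty_iff.mp hbl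
          have hb1 : blocks.length = 1 := by
            rw [hblknil] at hlen; simp at hlen; omega
          have hcs : cs = [] := by
            have hlp := congrArg List.length hpre
            rw [List.length_append, List.length_cons] at hlp
            have : cs.length = 0 := by omega
            exact List.eq_nil_of_length_eq_zero this
          have hrest' : rest ≠ [] := by
            intro h; rw [h] at hrest; simp at hrest
          have hnone : cAux rest ([] : List String) = none := cAux_empty_blocks rest
          rw [abcInner, cInner]
          simp [hch, hrest, hblknil, hnone, hcs, hb1, hrest', cInner]
        · -- blocks has ≥ 2 elements, A recurses; use IH on the recursive call
          have hb2 : blocks.length ≠ 1 := by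
            have : (pyRemove blocks blk) ≠ [] := by
              intro h; rw [h] at hbl; simp at hbl
            have : 0 < (pyRemove blocks blk).length := List.length_pos_of_ne_nil this
            omega
          have ihx := ih (pre ++ [blk]) (by simp [hpre])
          cases hc : cAux rest (pyRemove blocks blk) with
          | some L =>
            have hr : abcAux rest (pyRemove blocks blk) = (true, L) := by
              rw [IH]; simp [auxOut, hc]
            rw [abcInner, cInner]
            simp [hch, hrest, hbl, hr, hc]
          | none =>
            have hr1 : (abcAux rest (pyRemove blocks blk)).1 = false := by
              rw [IH]; simp [auxOut, hc]; split <;> simp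
            have hstep : abcInner ch rest blocks (blk :: cs) = abcInner ch rest blocks cs := by
              rw [abcInner]
              simp [hch, hrest, hbl, hr1]
            have hstep2 : cInner ch rest blocks (blk :: cs) = cInner ch rest blocks cs := by
              rw [cInner]
              simp [hch, hrest, hc]
            rw [hstep, hstep2, ihx]
            cases cInner ch rest blocks cs <;> simp [hb2]
    · have ihx := ih (pre ++ [blk]) (by simp [hpre])
      have hstep : abcInner ch rest blocks (blk :: cs) = abcInner ch rest blocks cs := by
        rw [abcInner]; simp [hch]
      have hstep2 : cInner ch rest blocks (blk :: cs) = cInner ch rest blocks cs := by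
        rw [cInner]; simp [hch]
      rw [hstep, hstep2, ihx]
      cases cInner ch rest blocks cs <;> simp [hch]

theorem aux_char : ∀ (n : Nat) (w : List Char) (b : List String), w.length ≤ n →
    abcAux w b = auxOut w b := by
  intro n
  induction n with
  | zero =>
    intro w b hw
    have : w = [] := List.eq_nil_of_length_eq_zero (Nat.le_zero.mp hw)
    subst this
    simp [abcAux, auxOut, cAux, badOne]
  | succ n ih =>
    intro w b hw
    cases w with
    | nil => simp [abcAux, auxOut, cAux, badOne]
    | cons ch rest =>
      have IH : ∀ b', abcAux rest b' = auxOut rest b' := by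
        intro b'; exact ih rest b' (by simp at hw; omega)
      have hin := inner_char ch rest b IH b [] rfl
      rw [show abcAux (ch :: rest) b =
            (match abcInner ch rest b b with
             | some r => r
             | none => ((false : Bool), b)) from by rw [abcAux]]
      rw [hin]
      have hbad : badOne (ch :: rest) b = true ↔
          (b.length = 1 ∧ rest ≠ [] ∧ b.any (fun x => decide (ch ∈ x.toList))) := by
        cases rest with
        | nil => simp [badOne]
        | cons c2 r2 =>
          cases b with
          | nil => simp [badOne]
          | cons x xs =>
            cases xs with
            | nil => simp [badOne]
            | cons y ys => simp [badOne]
      rw [auxOut, show cAux (ch :: rest) b = cInner ch rest b b from by rw [cAux]]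
      cases hc : cInner ch rest b b with
      | some L => simp
      | none =>
        simp only []
        by_cases hcond : (b.length = 1 ∧ rest ≠ [] ∧ b.any (fun x => decide (ch ∈ x.toList)))
        · rw [if_pos hcond, if_pos (hbad.mpr hcond)]
        · rw [if_neg hcond, if_neg (fun h => hcond (hbad.mp h))]

-- ===== B-side characterization =====

theorem scan_char (ch : Char) (srest : List Char) (rem : List String) :
    ∀ (k idx : Nat), rem.length - idx ≤ k →
    cInner ch srest rem (rem.drop idx) =
      (if hj : bScan ch rem idx < rem.length then
        (let bl := pyRemove rem (rem[bScan ch rem idx])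
         if srest.isEmpty then some bl
         else
           match cAux srest bl with
           | some L => some L
           | none => cInner ch srest rem (rem.drop (bScan ch rem idx + 1)))
       else none) := by
  intro k
  induction k with
  | zero =>
    intro idx hk
    have hge : rem.length ≤ idx := by omega
    have hscan : bScan ch rem idx = idx := by
      rw [bScan]; rw [dif_neg (by omega)]
    rw [List.drop_of_length_le hge]
    rw [hscan, dif_neg (by omega)]
    simp [cInner]
  | succ k ihk =>
    intro idx hk
    by_cases hlt : idx < rem.length
    · have hdrop : rem.drop idx = rem[idx] :: rem.drop (idx + 1) :=
        List.drop_eq_getElem_cons hlt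
      by_cases hch : ch ∈ (rem[idx]).toList
      · have hscan : bScan ch rem idx = idx := by
          rw [bScan]; rw [dif_pos hlt, if_pos hch]
        rw [hdrop, hscan, dif_pos hlt, cInner]
        simp [hch]
      · have hscan : bScan ch rem idx = bScan ch rem (idx + 1) := by
          rw [bScan]; rw [dif_pos hlt, if_neg hch]
        have : cInner ch srest rem (rem.drop idx) = cInner ch srest rem (rem.drop (idx + 1)) := by
          rw [hdrop, cInner]; simp [hch]
        rw [this, hscan]
        exact ihk (idx + 1) (by omega)
    · have hge : rem.length ≤ idx := by omega
      have hscan : bScan ch rem idx = idx := by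
        rw [bScan]; rw [dif_neg hlt]
      rw [List.drop_of_length_le hge, hscan, dif_neg hlt]
      simp [cInner]

def stackRes (b0 : List String) : List (List Char × List String × Nat) → Bool × List String
  | [] => (false, b0)
  | (s, rem, idx) :: stk =>
    match s with
    | [] => stackRes b0 stk
    | ch :: srest =>
      match cInner ch srest rem (rem.drop idx) with
      | some L => (true, L)
      | none => stackRes b0 stk

theorem bLoopF_char : ∀ (fuel : Nat) (b0 : List String) (stk : List (List Char × List String × Nat)),
    bStackW stk < fuel → bLoopF b0 fuel stk = stackRes b0 stk := by
  intro fuel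
  induction fuel with
  | zero => intro b0 stk h; omega
  | succ fuel ih =>
    intro b0 stk h
    match stk with
    | [] => rw [bLoopF]; rfl
    | (suffix, rem, idx) :: stk =>
      have hlt := bStackW_lt_cons (suffix, rem, idx) stk (bFrameW_pos _ _ _)
      match suffix with
      | [] =>
        rw [bLoopF, stackRes]
        exact ih b0 stk (by omega)
      | ch :: srest =>
        rw [bLoopF, stackRes]
        rw [scan_char ch srest rem rem.length idx (by omega)]
        by_cases hj : bScan ch rem idx < rem.length
        · rw [dif_pos hj]
          simp only [dif_pos hj]
          by_cases hs : srest.isEmpty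
          · simp [hs]
          · simp only [hs, Bool.false_eq_true, if_false]
            have hpush := bLoop_dec_push ch srest rem idx stk hj
            rw [ih b0 _ (by omega)]
            cases hsr : srest with
            | nil => rw [hsr] at hs; simp at hs
            | cons c2 sr2 =>
              rw [stackRes]
              rw [show cInner c2 sr2 (pyRemove rem rem[bScan ch rem idx]) ((pyRemove rem rem[bScan ch rem idx]).drop 0)
                    = cAux (c2 :: sr2) (pyRemove rem rem[bScan ch rem idx]) from by
                rw [List.drop_zero, cAux]]
              rw [← hsr]
              cases hc : cAux srest (pyRemove rem rem[bScan ch rem idx]) with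
              | some L => simp
              | none =>
                simp
                rw [stackRes]
        · rw [dif_neg hj, dif_neg hj]
          rw [ih b0 stk (by omega)]

theorem alt_char (word : String) (blocks : List String) :
    abc_py_alt word blocks =
      (match cAux word.toList blocks with
       | some L => ((true : Bool), L)
       | none => ((false : Bool), blocks)) := by
  rw [abc_py_alt]
  cases hw : word.toList with
  | nil => simp [cAux]
  | cons ch rest =>
    simp only [List.isEmpty_cons, if_false, Bool.false_eq_true]
    rw [bLoopF_char _ blocks _ (Nat.lt_succ_self _)]
    rw [stackRes]
    rw [show cInner ch rest blocks (blocks.drop 0) = cAux (ch :: rest) blocks from by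
      rw [List.drop_zero, cAux]]
    cases hc : cAux (ch :: rest) blocks with
    | some L => simp
    | none => simp [stackRes]

theorem bad_of_D (word : String) (blocks : List String) (hD : D_abc_py word blocks) :
    badOne word.toList blocks = true := by
  obtain ⟨h2, h1, hmem⟩ := hD
  cases hw : word.toList with
  | nil => rw [hw] at h2; simp at h2
  | cons ch rest =>
    cases rest with
    | nil => rw [hw] at h2; simp at h2
    | cons c2 r2 =>
      cases blocks with
      | nil => simp at h1
      | cons blk bs =>
        cases bs with
        | nil =>
          rw [hw] at hmem
          simp at hmem
          simp [badOne, hmem]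
        | cons b2 bs2 => simp at h1

theorem D_cAux_none (word : String) (blocks : List String) (hD : D_abc_py word blocks) :
    cAux word.toList blocks = none := by
  obtain ⟨h2, h1, hmem⟩ := hD
  cases hw : word.toList with
  | nil => rw [hw] at h2; simp at h2
  | cons ch rest =>
    cases rest with
    | nil => rw [hw] at h2; simp at h2
    | cons c2 r2 =>
      cases blocks with
      | nil => simp at h1
      | cons blk bs =>
        cases bs with
        | nil =>
          rw [hw] at hmem
          simp at hmem
          have hrm : pyRemove [blk] blk = [] := by
            simp [pyRemove, PySem.List.remove?_cons_self]
          rw [cAux, cInner]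
          simp [hmem, hrm, cAux_empty_blocks]
          rw [cInner]
        | cons b2 bs2 => simp at h1

-- ===== VERDICT =====
theorem abc_py_spec : Claim_unchanged_abc_py := by
  intro word blocks _hdom hD
  rw [abc_py, aux_char word.toList.length word.toList blocks (le_refl _), alt_char]
  rw [auxOut]
  cases hc : cAux word.toList blocks with
  | some L => simp
  | none =>
    simp only []
    rw [if_neg]
    intro hbad
    apply hD
    -- badOne true → D holds
    cases hw : word.toList with
    | nil => rw [hw] at hbad; simp [badOne] at hbad
    | cons ch rest =>
      cases rest with
      | nil => rw [hw] at hbad; simp [badOne] at hbad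
      | cons c2 r2 =>
        cases blocks with
        | nil => rw [hw] at hbad; simp [badOne] at hbad
        | cons blk bs =>
          cases bs with
          | nil =>
            rw [hw] at hbad; simp [badOne] at hbad
            exact ⟨by rw [hw]; simp, by simp, by rw [hw]; simpa using hbad⟩
          | cons b2 bs2 => rw [hw] at hbad; simp [badOne] at hbad

theorem abc_py_changed : Claim_changed_abc_py := by
  unfold Claim_changed_abc_py
  refine ⟨by decide, by decide, ?_, ?_, by decide⟩
  · rw [show abc_py pvDiffWitness_abc_py.1 pvDiffWitness_abc_py.2
        = abcAux ("ab".toList) ["ab"] from rfl]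
    rw [aux_char 2 _ _ (by decide)]
    rw [auxOut, D_cAux_none "ab" ["ab"] (by decide)]
    rw [if_pos (bad_of_D "ab" ["ab"] (by decide))]
    rfl
  · rw [show abc_py_alt pvDiffWitness_abc_py.1 pvDiffWitness_abc_py.2
        = abc_py_alt "ab" ["ab"] from rfl]
    rw [alt_char, D_cAux_none "ab" ["ab"] (by decide)]
    rfl

theorem abc_py_tight : Claim_exact_abc_py := by
  intro word blocks _hdom hD
  rw [abc_py, aux_char word.toList.length word.toList blocks (le_refl _), alt_char, auxOut]
  rw [D_cAux_none word blocks hD]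
  rw [if_pos (bad_of_D word blocks hD)]
  simp only []
  intro h
  have : ([] : List String) = blocks := congrArg Prod.snd h
  obtain ⟨_, h1, _⟩ := hD
  rw [← this] at h1
  simp at h1
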